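-- pv_equiv track=rewrite | github.com/yudai-patronai/problembook | problems/recursion/matryoshka/test_generator.py | cycle_solution
-- ===== SOURCE A (Python) =====
-- def cycle_solution(n):
--     s = ''
--     for i in range(n, 1, -1):
--         s += 'verh matryoshki {}\n'.format(i)
--     s += 'matryoshechka\n'
--     for i in range(2, n+1):
--         s += 'niz matryoshki {}\n'.format(i)
--
--     return s
-- ===== SOURCE B (Python) =====
-- def cycle_solution(n):
--     # Single pass over output line positions: line p of the printout is computed
--     # directly from p by arithmetic (top label, center marker, or bottom label),
--     # instead of two staged label loops around the center.
--     m = max(n - 1, 0)  # number of wrap levels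
--     return ''.join(
--         ['verh matryoshki {}\n'.format(n - p) if p < m
--          else 'matryoshechka\n' if p == m
--          else 'niz matryoshki {}\n'.format(p - m + 1)
--          for p in range(2 * m + 1)])
-- ===== Notes on version B (the rewrite author's own statement) =====
-- stated objective: alternative
-- what changed: Replaced A's two staged label loops (descending tops, center marker, ascending bottoms) by a single pass over output line positions that computes each line directly from its position by arithmetic case analysis.
import Mathlib
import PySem

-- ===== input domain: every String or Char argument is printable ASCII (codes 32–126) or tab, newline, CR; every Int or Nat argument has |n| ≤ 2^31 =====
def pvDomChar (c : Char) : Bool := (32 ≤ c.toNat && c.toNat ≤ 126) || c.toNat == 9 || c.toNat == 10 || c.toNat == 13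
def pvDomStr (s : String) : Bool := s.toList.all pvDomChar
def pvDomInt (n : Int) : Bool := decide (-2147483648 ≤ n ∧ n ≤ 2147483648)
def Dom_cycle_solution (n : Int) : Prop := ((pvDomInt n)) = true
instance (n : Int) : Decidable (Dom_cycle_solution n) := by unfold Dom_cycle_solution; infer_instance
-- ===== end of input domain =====

-- B replaces A's two staged label loops by a single pass over output line positions,
-- computing each line from its position by arithmetic case analysis; objective: alternative.

-- ===== PORT A =====
def cycle_solution (n : Int) : String :=
  let s : String :=
    (PySem.List.pyRange n 1 (-1)).foldl
      (fun s i => s ++ ("verh matryoshki " ++ PySem.Int.toStr i ++ "\n")) ""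
  let s := s ++ "matryoshechka\n"
  let s :=
    (PySem.List.pyRange 2 (n + 1) 1).foldl
      (fun s i => s ++ ("niz matryoshki " ++ PySem.Int.toStr i ++ "\n")) s
  s

-- ===== PORT B =====
-- line p of the printout, computed from its position p (B's conditional expression)
def pvLine (n m p : Int) : String :=
  if p < m then "verh matryoshki " ++ PySem.Int.toStr (n - p) ++ "\n"
  else if p = m then "matryoshechka\n"
  else "niz matryoshki " ++ PySem.Int.toStr (p - m + 1) ++ "\n"

-- B's local m = max(n-1, 0) (the wrap-level count) is inlined
def cycle_solution_alt (n : Int) : String :=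
  PySem.Str.join ""
    ((PySem.List.pyRange 0 (2 * max (n - 1) 0 + 1) 1).map (pvLine n (max (n - 1) 0)))

-- ===== PRECONDITION & SPEC =====
def Spec_cycle_solution (n : Int) (out : String) : Prop := out = cycle_solution_alt n
instance (n : Int) (out : String) : Decidable (Spec_cycle_solution n out) := by unfold Spec_cycle_solution; infer_instance

-- ===== CLAIM =====
def Claim_equal_cycle_solution : Prop := ∀ (n : Int), Dom_cycle_solution n → Spec_cycle_solution n (cycle_solution n)

-- ===== LEMMAS AND PROOFS =====

-- pull the initial accumulator out of an append-accumulating string foldl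
theorem pvFoldlStr (g : Int → String) :
    ∀ (L : List Int) (init : String),
      L.foldl (fun s i => s ++ g i) init = init ++ L.foldl (fun s i => s ++ g i) "" := by
  intro L
  induction L with
  | nil => intro init; simp
  | cons a L ih =>
      intro init
      simp only [List.foldl_cons]
      rw [ih (init ++ g a), ih ("" ++ g a)]
      simp [String.append_assoc]

-- one level of A wraps the previous printout between its top and bottom labels
theorem pvRecA (m : Int) (hm : 1 ≤ m) :
    cycle_solution (m + 1) =
      ("verh matryoshki " ++ PySem.Int.toStr (m + 1) ++ "\n") ++ cycle_solution m ++
        ("niz matryoshki " ++ PySem.Int.toStr (m + 1) ++ "\n") := by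
  unfold cycle_solution
  rw [PySem.List.pyRange_neg_one_cons (show (1 : Int) < m + 1 by omega),
      PySem.List.pyRange_one_succ_right (show (2 : Int) ≤ m + 1 by omega)]
  have hsub : (m + 1 - 1 : Int) = m := by omega
  rw [hsub]
  simp only [List.foldl_append, List.foldl]
  rw [pvFoldlStr (fun i => "verh matryoshki " ++ PySem.Int.toStr i ++ "\n")
        (PySem.List.pyRange m 1 (-1))
        ("" ++ ("verh matryoshki " ++ PySem.Int.toStr (m + 1) ++ "\n"))]
  conv_lhs =>
    rw [pvFoldlStr (fun i => "niz matryoshki " ++ PySem.Int.toStr i ++ "\n")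
          (PySem.List.pyRange 2 (m + 1) 1)]
  conv_rhs =>
    rw [pvFoldlStr (fun i => "niz matryoshki " ++ PySem.Int.toStr i ++ "\n")
          (PySem.List.pyRange 2 (m + 1) 1)]
  simp [String.append_assoc]

theorem pvBaseA (n : Int) (h : n ≤ 1) : cycle_solution n = "matryoshechka\n" := by
  unfold cycle_solution
  rw [PySem.List.pyRange_neg_one_eq_nil h,
      PySem.List.pyRange_one_eq_nil (by omega : (n : Int) + 1 ≤ 2)]
  simp

-- two strings are equal when their character lists are
theorem pvStrExt (a b : String) (h : a.toList = b.toList) : a = b := by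
  have := congrArg String.ofList h
  simpa using this

theorem pvJoinNil : PySem.Str.join "" ([] : List String) = "" := by
  apply pvStrExt
  simp [PySem.Str.toList_join, PySem.Chars.join, List.intercalate]

theorem pvJoinCons (a : String) (L : List String) :
    PySem.Str.join "" (a :: L) = a ++ PySem.Str.join "" L := by
  apply pvStrExt
  cases L with
  | nil => simp [PySem.Str.toList_join, PySem.Chars.join, List.intercalate]
  | cons b M => simp [PySem.Str.toList_join, PySem.Chars.join_cons_cons]

theorem pvJoinSnoc (L : List String) (a : String) :
    PySem.Str.join "" (L ++ [a]) = PySem.Str.join "" L ++ a := by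
  induction L with
  | nil => simp [pvJoinCons, pvJoinNil]
  | cons b M ih => simp [pvJoinCons, ih, String.append_assoc]

theorem pvBaseB (n : Int) (h : n < 2) : cycle_solution_alt n = "matryoshechka\n" := by
  unfold cycle_solution_alt
  have hm : max (n - 1) 0 = 0 := by omega
  rw [hm]
  norm_num
  rw [show (PySem.List.pyRange 0 1 1 : List Int) = [0] from PySem.List.pyRange_one_singleton 0]
  rw [List.map_singleton, pvJoinCons, pvJoinNil]
  simp [pvLine]

-- shifting the position by one level drops the outermost wrap
theorem pvLineShift (m : Int) (_hm : 1 ≤ m) (k : Nat) :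
    pvLine (m + 1) m (1 + (k : Int)) = pvLine m (m - 1) (0 + (k : Int)) := by
  unfold pvLine
  have e1 : (m + 1) - (1 + (k : Int)) = m - (0 + (k : Int)) := by omega
  have e2 : (1 + (k : Int)) - m + 1 = (0 + (k : Int)) - (m - 1) + 1 := by omega
  rw [e1, e2]
  split_ifs with h1 h2 h3 h4 h5 h6 h7 <;> first | rfl | (exfalso; omega)

-- one level of B: the first and last positions split off, the middle shifts
theorem pvRecB (m : Int) (hm : 1 ≤ m) :
    cycle_solution_alt (m + 1) =
      ("verh matryoshki " ++ PySem.Int.toStr (m + 1) ++ "\n") ++ cycle_solution_alt m ++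
        ("niz matryoshki " ++ PySem.Int.toStr (m + 1) ++ "\n") := by
  unfold cycle_solution_alt
  have hL : max (m + 1 - 1) 0 = m := by omega
  have hR : max (m - 1) 0 = m - 1 := by omega
  rw [hL, hR]
  rw [PySem.List.pyRange_one_cons (show (0 : Int) < 2 * m + 1 by omega)]
  rw [show (0 : Int) + 1 = 1 by norm_num]
  rw [PySem.List.pyRange_one_succ_right (show (1 : Int) ≤ 2 * m by omega)]
  rw [List.map_cons, List.map_append, List.map_singleton,
      pvJoinCons, pvJoinSnoc]
  have hhead : pvLine (m + 1) m 0 =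
      "verh matryoshki " ++ PySem.Int.toStr (m + 1) ++ "\n" := by
    unfold pvLine
    rw [if_pos (by omega : (0 : Int) < m)]
    norm_num
  have hlast : pvLine (m + 1) m (2 * m) =
      "niz matryoshki " ++ PySem.Int.toStr (m + 1) ++ "\n" := by
    unfold pvLine
    rw [if_neg (by omega : ¬ (2 * m : Int) < m), if_neg (by omega : ¬ (2 * m : Int) = m)]
    have : (2 * m : Int) - m + 1 = m + 1 := by omega
    rw [this]
  have hmid : (PySem.List.pyRange 1 (2 * m) 1).map (pvLine (m + 1) m) =
      (PySem.List.pyRange 0 (2 * (m - 1) + 1) 1).map (pvLine m (m - 1)) := by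
    rw [PySem.List.pyRange_one, PySem.List.pyRange_one]
    have hlen : ((2 * m - 1 : Int)).toNat = ((2 * (m - 1) + 1 - 0 : Int)).toNat := by omega
    rw [hlen]
    rw [List.map_map, List.map_map]
    apply List.map_congr_left
    intro k _
    exact pvLineShift m hm k
  rw [hhead, hlast, hmid]
  simp [String.append_assoc]

theorem pvEq (n : Int) : cycle_solution n = cycle_solution_alt n := by
  rcases le_or_gt n 1 with h | h
  · rw [pvBaseA n h, pvBaseB n (by omega)]
  · have h1 : (1 : Int) ≤ n := by omega
    clear h
    induction n, h1 using Int.le_induction with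
    | base => rw [pvBaseA 1 (by omega), pvBaseB 1 (by omega)]
    | succ m hm ih => rw [pvRecA m hm, pvRecB m hm, ih]

-- ===== VERDICT =====
theorem cycle_solution_spec : Claim_equal_cycle_solution := by
  intro n _
  exact pvEq n
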